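-- pv_equiv track=rewrite | github.com/osccso/hacker-rank-python | migratorybirds.py | migratoryBirds
-- ===== SOURCE A (Python) =====
-- def migratoryBirds(arr):
--   #finding the most frequently sighted birds
--   #transform the array to a set in order to get unique elements
--   listUnique = list(dict.fromkeys(arr))
--   #sorting the list
--   listUnique.sort()
--   id = 0 #there're just 1,2,3,4 and 5 types
--   maxappearances = 0
--   for bird in listUnique:
--     #counting the amount of appearances
--     appearances = sum([bird == i for i in arr])
--     if appearances > maxappearances:
--       maxappearances = appearances
--       id = bird
--   return id
-- ===== SOURCE B (Python) =====
-- def migratoryBirds(arr):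
--   best_id = 0
--   best_count = 0
--   cur = 0
--   prev = None
--   for x in sorted(arr):
--     cur = cur + 1 if x == prev else 1
--     if cur > best_count:
--       best_count = cur
--       best_id = x
--     prev = x
--   return best_id
-- ===== Notes on version B (the rewrite author's own statement) =====
-- stated objective: faster
-- what changed: Instead of deduplicating and then counting each distinct bird with a full scan of arr (quadratic), B sorts arr once and finds the most frequent smallest id in a single pass over the sorted list tracking the current run length and the best (id,count) with a strict > update.
import Mathlib
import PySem

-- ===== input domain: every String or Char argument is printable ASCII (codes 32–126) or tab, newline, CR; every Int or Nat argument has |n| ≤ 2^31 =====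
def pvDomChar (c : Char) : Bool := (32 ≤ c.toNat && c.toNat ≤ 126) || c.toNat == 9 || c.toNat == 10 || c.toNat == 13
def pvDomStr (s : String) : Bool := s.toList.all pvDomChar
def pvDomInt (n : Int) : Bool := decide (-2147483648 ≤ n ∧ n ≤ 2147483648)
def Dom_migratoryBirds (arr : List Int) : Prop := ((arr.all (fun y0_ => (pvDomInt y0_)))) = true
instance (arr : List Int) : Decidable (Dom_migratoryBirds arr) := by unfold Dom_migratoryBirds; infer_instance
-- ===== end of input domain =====

-- B replaces A's dedup-then-count-each-bird scan (O(u*n)) by one pass over sorted(arr)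
-- tracking run length and best (id, count); measured faster at the large sizes.

-- ===== PORT A =====
def migratoryBirds (arr : List Int) : Int :=
  -- listUnique = list(dict.fromkeys(arr)); listUnique.sort()
  let listUnique := PySem.List.sorted (PySem.List.dedup arr) (fun x => x) false
  let r := listUnique.foldl
    (fun (st : Int × Int) bird =>
      -- appearances = sum([bird == i for i in arr])
      let appearances := (arr.map (fun i => if bird = i then (1 : Int) else 0)).sum
      if st.2 < appearances then (bird, appearances) else st)
    (0, 0)
  r.1

-- ===== PORT B =====
def migratoryBirds_alt (arr : List Int) : Int :=
  -- state: (best_id, best_count, cur, prev)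
  let r := (PySem.List.sorted arr (fun x => x) false).foldl
    (fun (st : Int × Int × Int × Option Int) x =>
      let cur := if some x = st.2.2.2 then st.2.2.1 + 1 else 1
      if st.2.1 < cur then (x, cur, cur, some x) else (st.1, st.2.1, cur, some x))
    (0, 0, 0, none)
  r.1

-- ===== PRECONDITION & SPEC =====
def Spec_migratoryBirds (arr : List Int) (out : Int) : Prop := out = migratoryBirds_alt arr
instance (arr : List Int) (out : Int) : Decidable (Spec_migratoryBirds arr out) := by unfold Spec_migratoryBirds; infer_instance

-- ===== CLAIM (what is proved, stated in full; the proofs are below) =====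
def Claim_equal_migratoryBirds : Prop := ∀ (arr : List Int), Dom_migratoryBirds arr → Spec_migratoryBirds arr (migratoryBirds arr)

-- ===== LEMMAS AND PROOFS =====

-- B's loop body and fold
def bStep (st : Int × Int × Int × Option Int) (x : Int) : Int × Int × Int × Option Int :=
  let cur := if some x = st.2.2.2 then st.2.2.1 + 1 else 1
  if st.2.1 < cur then (x, cur, cur, some x) else (st.1, st.2.1, cur, some x)

def bF (s : List Int) (st : Int × Int × Int × Option Int) : Int × Int × Int × Option Int :=
  s.foldl bStep st

-- A's loop, abstracted: counts taken in the list s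
def aF (s u : List Int) (st : Int × Int) : Int × Int :=
  u.foldl (fun st bird =>
    if st.2 < (s.count bird : Int) then (bird, (s.count bird : Int)) else st) st

lemma bF_replicate (x : Int) : ∀ (j : Nat) (b c cur : Int), (cur ≤ c ∨ (b = x ∧ c = cur)) →
    bF (List.replicate j x) (b, c, cur, some x) =
      if c < cur + j then (x, cur + j, cur + j, some x) else (b, c, cur + j, some x) := by
  intro j
  induction j with
  | zero =>
    intro b c cur h
    simp only [List.replicate, bF, List.foldl_nil, Nat.cast_zero, add_zero]
    rcases h with h | ⟨hb, hc⟩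
    · rw [if_neg (by omega)]
    · subst hb hc; rw [if_neg (by omega)]
  | succ j ih =>
    intro b c cur h
    rw [List.replicate_succ]
    simp only [bF, List.foldl_cons]
    have hx : bStep (b, c, cur, some x) x =
        if c < cur + 1 then (x, cur + 1, cur + 1, some x) else (b, c, cur + 1, some x) := by
      simp [bStep]
    rw [hx]
    by_cases hcc : c < cur + 1
    · rw [if_pos hcc]
      have h2 := ih x (cur + 1) (cur + 1) (Or.inr ⟨rfl, rfl⟩)
      simp only [bF] at h2
      rw [h2]
      push_cast
      split_ifs <;> simp_all [Prod.mk.injEq] <;> omega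
    · rw [if_neg hcc]
      have h2 := ih b c (cur + 1) (Or.inl (by omega))
      simp only [bF] at h2
      rw [h2]
      push_cast
      split_ifs <;> simp_all [Prod.mk.injEq] <;> omega

lemma bF_run (k : Nat) (x b c cur : Int) (p : Option Int) (hp : p ≠ some x) (hk : 1 ≤ k) :
    bF (List.replicate k x) (b, c, cur, p) =
      if c < (k : Int) then (x, (k : Int), (k : Int), some x) else (b, c, (k : Int), some x) := by
  obtain ⟨j, rfl⟩ : ∃ j, k = j + 1 := ⟨k - 1, by omega⟩
  rw [List.replicate_succ]
  simp only [bF, List.foldl_cons]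
  have hx : bStep (b, c, cur, p) x = if c < 1 then (x, 1, 1, some x) else (b, c, 1, some x) := by
    simp only [bStep, if_neg (fun h => hp (Eq.symm h))]
  rw [hx]
  by_cases hc1 : c < 1
  · rw [if_pos hc1]
    have h2 := bF_replicate x j x 1 1 (Or.inr ⟨rfl, rfl⟩)
    simp only [bF] at h2
    rw [h2]
    push_cast
    split_ifs <;> simp_all [Prod.mk.injEq] <;> omega
  · rw [if_neg hc1]
    have h2 := bF_replicate x j b c 1 (Or.inl (by omega))
    simp only [bF] at h2
    rw [h2]
    push_cast
    split_ifs <;> simp_all [Prod.mk.injEq] <;> omega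

lemma aF_congr (s₁ s₂ : List Int) : ∀ (u : List Int) (st : Int × Int),
    (∀ y ∈ u, s₁.count y = s₂.count y) → aF s₁ u st = aF s₂ u st := by
  intro u
  induction u with
  | nil => intro st h; rfl
  | cons a u ih =>
    intro st h
    simp only [aF, List.foldl_cons]
    rw [h a (by simp)]
    exact ih _ (fun y hy => h y (by simp [hy]))

lemma main_lemma : ∀ (n : Nat) (s u : List Int), s.length ≤ n →
    s.Pairwise (· ≤ ·) → u.Pairwise (· < ·) → (∀ y, y ∈ u ↔ y ∈ s) →
    ∀ (b c cur : Int) (p : Option Int), (∀ y ∈ s, p ≠ some y) →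
    ((bF s (b, c, cur, p)).1, (bF s (b, c, cur, p)).2.1) = aF s u (b, c) := by
  intro n
  induction n with
  | zero =>
    intro s u hlen _ _ hmem b c cur p _
    have hs0 : s = [] := List.length_eq_zero_iff.mp (by omega)
    subst hs0
    have hu0 : u = [] := List.eq_nil_iff_forall_not_mem.mpr (fun y hy => by simpa using (hmem y).mp hy)
    subst hu0; rfl
  | succ n ih =>
    intro s u hlen hs hu hmem b c cur p hp
    cases s with
    | nil =>
      have hu0 : u = [] := List.eq_nil_iff_forall_not_mem.mpr (fun y hy => by simpa using (hmem y).mp hy)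
      subst hu0; rfl
    | cons x s' =>
      -- split the sorted list into the run of x and the rest
      have hsplit := List.takeWhile_append_dropWhile (p := fun z => z == x) (l := x :: s')
      have hw_repl : (x :: s').takeWhile (fun z => z == x) =
          List.replicate ((x :: s').takeWhile (fun z => z == x)).length x := by
        rw [List.eq_replicate_length]
        intro b hb; simpa using List.mem_takeWhile_imp hb
      have hw_len : 1 ≤ ((x :: s').takeWhile (fun z => z == x)).length := by
        rw [List.takeWhile_cons_of_pos (by simp)]; simp
      obtain ⟨hx_le, hs'⟩ := List.pairwise_cons.mp hs
      have ht_sub : ((x :: s').dropWhile (fun z => z == x)).Sublist (x :: s') :=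
        List.dropWhile_sublist _
      have ht_sorted : ((x :: s').dropWhile (fun z => z == x)).Pairwise (· ≤ ·) :=
        hs.sublist ht_sub
      -- every element of the rest is strictly greater than x
      have hxt : ∀ y ∈ (x :: s').dropWhile (fun z => z == x), x < y := by
        cases ht : (x :: s').dropWhile (fun z => z == x) with
        | nil => simp
        | cons h t' =>
          have hh_ne : ¬ (h == x) = true := by
            intro hpp
            have h1 := List.head?_dropWhile_not (fun z => z == x) (x :: s')
            rw [ht] at h1
            simp at h1
            exact h1 (by simpa using hpp)
          have hh_mem : h ∈ x :: s' := ht_sub.mem (by rw [ht]; simp)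
          have hx_le_h : x ≤ h := by
            rcases List.mem_cons.mp hh_mem with h1 | h1
            · omega
            · exact hx_le _ h1
          have hx_lt_h : x < h := lt_of_le_of_ne hx_le_h (by simpa using fun e => hh_ne (by simp [e]))
          intro y hy
          rw [ht] at ht_sorted
          rcases List.mem_cons.mp hy with rfl | h1
          · exact hx_lt_h
          · exact lt_of_lt_of_le hx_lt_h ((List.pairwise_cons.mp ht_sorted).1 _ h1)
      have hx_notin_t : x ∉ (x :: s').dropWhile (fun z => z == x) := fun h => absurd (hxt x h) (by omega)
      -- u starts with x
      have hxu : x ∈ u := (hmem x).mpr (by simp)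
      cases u with
      | nil => simp at hxu
      | cons z u' =>
        obtain ⟨hz_lt, hu'⟩ := List.pairwise_cons.mp hu
        have hzx : x = z := by
          refine Eq.symm ?_
          have hz_s : z ∈ x :: s' := (hmem z).mp (by simp)
          have hx_le_z : x ≤ z := by
            rcases List.mem_cons.mp hz_s with h1 | h1
            · omega
            · exact hx_le _ h1
          rcases List.mem_cons.mp hxu with h1 | h1
          · omega
          · exact absurd (hz_lt _ h1) (by omega)
        subst hzx
        -- counts
        have hcnt : (x :: s').count x = ((x :: s').takeWhile (fun z => z == x)).length := by
          conv_lhs => rw [← hsplit]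
          rw [List.count_append, List.count_eq_zero.mpr hx_notin_t]
          conv_lhs => rw [hw_repl]
          simp
        have hcnt' : ∀ y ∈ u', (x :: s').count y = ((x :: s').dropWhile (fun z => z == x)).count y := by
          intro y hy
          have hyx : x < y := hz_lt _ hy
          conv_lhs => rw [← hsplit]
          rw [List.count_append, List.count_eq_zero.mpr, Nat.zero_add]
          rw [hw_repl]
          simp only [List.mem_replicate]
          rintro ⟨-, rfl⟩; omega
        -- run the B-fold over the run of x
        have hpx : p ≠ some x := hp x (by simp)
        have hrun := bF_run ((x :: s').takeWhile (fun z => z == x)).length x b c cur p hpx hw_len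
        have hbf : bF (x :: s') (b, c, cur, p) =
            bF ((x :: s').dropWhile (fun z => z == x))
               (bF (List.replicate ((x :: s').takeWhile (fun z => z == x)).length x) (b, c, cur, p)) := by
          conv_lhs => rw [← hsplit, hw_repl]
          simp only [bF, List.foldl_append]
        rw [hbf, hrun]
        -- unfold the first A-step
        have haf : aF (x :: s') (x :: u') (b, c) =
            aF (x :: s') u'
              (if c < ((x :: s').count x : Int) then (x, ((x :: s').count x : Int)) else (b, c)) := by
          simp only [aF, List.foldl_cons]
        rw [haf, hcnt, aF_congr (x :: s') ((x :: s').dropWhile (fun z => z == x)) u' _ hcnt']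
        -- recurse on the rest
        have hlen' : ((x :: s').dropWhile (fun z => z == x)).length ≤ n := by
          have := congrArg List.length hsplit
          simp only [List.length_append] at this
          simp only [List.length_cons] at this hlen
          omega
        have hmem' : ∀ y, y ∈ u' ↔ y ∈ (x :: s').dropWhile (fun z => z == x) := by
          intro y
          constructor
          · intro hy
            have hyx : x < y := hz_lt _ hy
            have hys : y ∈ x :: s' := (hmem y).mp (by simp [hy])
            rw [← hsplit] at hys
            rcases List.mem_append.mp hys with h1 | h1
            · rw [hw_repl] at h1
              simp only [List.mem_replicate] at h1
              omega
            · exact h1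
          · intro hy
            have hyx : x < y := hxt y hy
            have hys : y ∈ x :: s' := ht_sub.mem hy
            rcases List.mem_cons.mp ((hmem y).mpr hys) with h1 | h1
            · omega
            · exact h1
        have hp' : ∀ y ∈ (x :: s').dropWhile (fun z => z == x), (some x : Option Int) ≠ some y := by
          intro y hy
          have := hxt y hy
          simp only [ne_eq, Option.some.injEq]
          omega
        by_cases hL : c < (((x :: s').takeWhile (fun z => z == x)).length : Int)
        · rw [if_pos hL, if_pos hL]
          exact ih _ u' hlen' ht_sorted hu' hmem' _ _ _ _ hp'
        · rw [if_neg hL, if_neg hL]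
          exact ih _ u' hlen' ht_sorted hu' hmem' _ _ _ _ hp'

-- sum([bird == i for i in arr]) is the count of bird in arr
lemma sum_eq_count (bird : Int) : ∀ (l : List Int),
    (l.map (fun i => if bird = i then (1 : Int) else 0)).sum = (l.count bird : Int) := by
  intro l
  induction l with
  | nil => rfl
  | cons a l ih =>
    simp only [List.map_cons, List.sum_cons, List.count_cons, ih]
    by_cases h : bird = a
    · simp [h, eq_comm]
      omega
    · simp only [if_neg h, beq_iff_eq, if_neg (fun e => h (Eq.symm e))]
      omega

-- ===== VERDICT (by name: the statement is the Claim_ definition above) =====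
-- A's port, rewritten as the abstract fold aF over the sorted list of arr
lemma migratoryBirds_eq_aF (arr : List Int) :
    migratoryBirds arr =
      (aF (PySem.List.sorted arr (fun x => x) false)
          (PySem.List.sorted (PySem.List.dedup arr) (fun x => x) false) (0, 0)).1 := by
  have h1 : ∀ (u : List Int) (st : Int × Int),
      u.foldl (fun (st : Int × Int) bird =>
        let appearances := (arr.map (fun i => if bird = i then (1 : Int) else 0)).sum
        if st.2 < appearances then (bird, appearances) else st) st = aF arr u st := by
    intro u st
    simp only [aF, sum_eq_count]
  show ((PySem.List.sorted (PySem.List.dedup arr) (fun x => x) false).foldl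
      (fun (st : Int × Int) bird =>
        let appearances := (arr.map (fun i => if bird = i then (1 : Int) else 0)).sum
        if st.2 < appearances then (bird, appearances) else st) (0, 0)).1 = _
  rw [h1]
  rw [aF_congr arr (PySem.List.sorted arr (fun x => x) false) _ _
    (fun y _ => ((PySem.List.sorted_perm arr (fun x => x) false).count_eq y).symm)]

-- ===== VERDICT (by name: the statement is the Claim_ definition above) =====
theorem migratoryBirds_spec : Claim_equal_migratoryBirds := by
  intro arr _
  unfold Spec_migratoryBirds
  rw [migratoryBirds_eq_aF]
  have hmain := main_lemma (PySem.List.sorted arr (fun x => x) false).length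
    (PySem.List.sorted arr (fun x => x) false)
    (PySem.List.sorted (PySem.List.dedup arr) (fun x => x) false)
    (le_refl _)
    (PySem.List.sorted_pairwise arr (fun x => x))
    (by simpa using PySem.List.sorted_ofList_pairwise_lt (xs := arr))
    (by intro y; simp [PySem.List.mem_sorted])
    0 0 0 none (by intro y _; simp)
  exact (congrArg Prod.fst hmain).symm
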